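-- pv_equiv track=rewrite | github.com/AtoBrightSide/contests | contest-2-feb11/D_Kefa_and_Company.py | solution
-- ===== SOURCE A (Python) =====
-- def solution(ppl, d):
--     ppl.sort()
--     l = r = 0
--     curr = best = 0
--     while r < len(ppl):
--         while r < len(ppl) and abs(ppl[l][0] - ppl[r][0]) < d:
--             curr += ppl[r][1]
--             r += 1
--         best = max(best, curr)
--         curr -= ppl[l][1]
--         l += 1
--     return best
-- ===== SOURCE B (Python) =====
-- def _bisect_left(xs, target):
--     lo, hi = 0, len(xs)
--     while lo < hi:
--         mid = (lo + hi) // 2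
--         if xs[mid] < target:
--             lo = mid + 1
--         else:
--             hi = mid
--     return lo
--
--
-- def solution(ppl, d):
--     ppl.sort()
--     xs = [p[0] for p in ppl]
--     prefix = [0]
--     for p in ppl:
--         prefix.append(prefix[-1] + p[1])
--     best = 0
--     for l in range(len(ppl)):
--         hi = _bisect_left(xs, xs[l] + d)
--         best = max(best, prefix[hi] - prefix[l])
--         if hi == len(ppl):
--             break
--     return best
-- ===== Notes on version B (the rewrite author's own statement) =====
-- stated objective: alternative
-- what changed: Replaces A's two-pointer sliding window with a prefix-sum table of friendship values plus a hand-rolled bisect_left binary search per left endpoint, stopping once a window reaches the end of the list.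
import Mathlib
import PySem

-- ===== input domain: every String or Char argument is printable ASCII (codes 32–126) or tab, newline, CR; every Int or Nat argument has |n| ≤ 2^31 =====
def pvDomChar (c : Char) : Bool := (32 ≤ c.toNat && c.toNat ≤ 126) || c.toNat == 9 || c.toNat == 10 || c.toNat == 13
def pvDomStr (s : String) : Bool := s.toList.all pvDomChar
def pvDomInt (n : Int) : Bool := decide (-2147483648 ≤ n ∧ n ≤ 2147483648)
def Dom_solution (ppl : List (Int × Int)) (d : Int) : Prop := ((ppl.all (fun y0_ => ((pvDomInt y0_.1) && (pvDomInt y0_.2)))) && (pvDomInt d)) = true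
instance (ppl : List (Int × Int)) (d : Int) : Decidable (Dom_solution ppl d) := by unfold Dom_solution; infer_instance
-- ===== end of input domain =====

-- B replaces A's two-pointer sliding window by a prefix-sum table plus a hand-rolled binary
-- search per left endpoint (objective: alternative; same O(n log n) cost, different algorithm).
-- Both A and B sort the argument list in place (ppl.sort()); the equivalence proved here is
-- about the RETURN value (the in-place sort side effect is identical in A and B).

-- ===== PORT A =====
-- inner while loop: 'while r < len(ppl) and abs(ppl[l][0] - ppl[r][0]) < d: curr += ppl[r][1]; r += 1'
-- (l is unchanged inside the loop; ppl[l] is read through getD — Pre_ keeps l in range wherever A returns)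
def aInner (s : List (Int × Int)) (d : Int) (l r : Nat) (curr : Int) : Nat × Int :=
  if h : r < s.length then
    if |(s.getD l (0, 0)).1 - s[r].1| < d then
      aInner s d l (r + 1) (curr + s[r].2)
    else (r, curr)
  else (r, curr)
termination_by s.length - r
decreasing_by omega

-- outer while loop, fuelled: under Pre_ (d > 0) it runs at most len(ppl) iterations,
-- so fuel len+1 is never exhausted there (proved in aOuter_eq_bLoop below)
def aOuter (s : List (Int × Int)) (d : Int) (fuel : Nat) (l r : Nat) (curr best : Int) : Int :=
  match fuel with
  | 0 => best
  | fuel + 1 =>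
    if r < s.length then
      let p := aInner s d l r curr
      aOuter s d fuel (l + 1) p.1 (p.2 - (s.getD l (0, 0)).2) (max best p.2)
    else best

-- 'ppl.sort()' on int pairs is PySem.List.sorted2 ppl Prod.fst Prod.snd (Python's lexicographic sort)
def solution (ppl : List (Int × Int)) (d : Int) : Int :=
  aOuter (PySem.List.sorted2 ppl Prod.fst Prod.snd) d
    ((PySem.List.sorted2 ppl Prod.fst Prod.snd).length + 1) 0 0 0 0

-- ===== PORT B =====
-- hand-rolled bisect_left of Source B (A imports no modules, so B carries its own binary search);
-- fuelled: each pass shrinks hi-lo, so fuel len(xs) is never exhausted (proved in bLower_isLB)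
def bLower (xs : List Int) (t : Int) (fuel lo hi : Nat) : Nat :=
  match fuel with
  | 0 => lo
  | fuel + 1 =>
    if lo < hi then
      let mid := (lo + hi) / 2
      if xs.getD mid 0 < t then bLower xs t fuel (mid + 1) hi else bLower xs t fuel lo mid
    else lo

-- 'prefix = [0]; for p in ppl: prefix.append(prefix[-1] + p[1])'
def prefixOf (s : List (Int × Int)) : List Int :=
  s.foldl (fun acc p => acc ++ [PySem.List.pyGetD acc (-1) 0 + p.2]) [0]

-- 'for l in range(len(ppl)): hi = _bisect_left(xs, xs[l] + d); best = max(best, prefix[hi] - prefix[l]);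
--  if hi == len(ppl): break'  — fuelled: the body runs at most n times
def bLoop (xs pre : List Int) (d : Int) (n fuel l : Nat) (best : Int) : Int :=
  match fuel with
  | 0 => best
  | fuel + 1 =>
    if l < n then
      let hi := bLower xs (xs.getD l 0 + d) xs.length 0 xs.length
      let best' := max best (pre.getD hi 0 - pre.getD l 0)
      if hi = n then best' else bLoop xs pre d n fuel (l + 1) best'
    else best

def solution_alt (ppl : List (Int × Int)) (d : Int) : Int :=
  bLoop ((PySem.List.sorted2 ppl Prod.fst Prod.snd).map Prod.fst)
    (prefixOf (PySem.List.sorted2 ppl Prod.fst Prod.snd)) d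
    (PySem.List.sorted2 ppl Prod.fst Prod.snd).length
    (PySem.List.sorted2 ppl Prod.fst Prod.snd).length 0 0

-- ===== PRECONDITION & SPEC =====
-- A raises IndexError when ppl ≠ [] and d ≤ 0 (the window never opens and l runs past the end);
-- exactly those inputs are excluded; everywhere else A returns normally.
def Pre_solution (ppl : List (Int × Int)) (d : Int) : Prop := ppl = [] ∨ 0 < d
instance (ppl : List (Int × Int)) (d : Int) : Decidable (Pre_solution ppl d) := by
  unfold Pre_solution; infer_instance

def pvWitness_solution : (List (Int × Int)) × Int := ([(75, 5), (0, 100), (150, 20)], 99)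

def Spec_solution (ppl : List (Int × Int)) (d : Int) (out : Int) : Prop := out = solution_alt ppl d
instance (ppl : List (Int × Int)) (d : Int) (out : Int) : Decidable (Spec_solution ppl d out) := by
  unfold Spec_solution; infer_instance

-- ===== CLAIM (what is proved, stated in full; the proofs are below) =====
def Claim_equal_solution : Prop := ∀ (ppl : List (Int × Int)) (d : Int),
  Dom_solution ppl d → Pre_solution ppl d → Spec_solution ppl d (solution ppl d)

-- ===== LEMMAS AND PROOFS =====

-- Python's pair sort key, written as the lexicographic order on Int ×ₗ Int
theorem lexBefore_eq : (fun (a b : Int × Int) =>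
      (decide (a.1 < b.1) || (!decide (b.1 < a.1) && decide (a.2 < b.2)))) =
      (fun a b => decide ((toLex a : Int ×ₗ Int) < toLex b)) := by
  funext a b
  rw [Bool.eq_iff_iff]
  simp only [Bool.or_eq_true, Bool.and_eq_true, Bool.not_eq_eq_eq_not, Bool.not_true,
    decide_eq_true_eq, decide_eq_false_iff_not, Prod.Lex.lt_iff, ofLex_toLex]
  omega

theorem sorted2_eq_foldl (ppl : List (Int × Int)) :
    PySem.List.sorted2 ppl Prod.fst Prod.snd false =
      ppl.foldl (fun acc x => PySem.List.insertBy
        (fun a b => decide ((toLex a : Int ×ₗ Int) < toLex b)) x acc) [] := by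
  show ppl.foldl (fun acc x => PySem.List.insertBy _ x acc) [] = _
  rw [lexBefore_eq]
  rfl

-- the sorted list is nondecreasing in its first (money) component
theorem sorted2_fst_pairwise (ppl : List (Int × Int)) :
    (PySem.List.sorted2 ppl Prod.fst Prod.snd false).Pairwise (fun a b => a.1 ≤ b.1) := by
  rw [sorted2_eq_foldl]
  have key : ∀ (xs : List (Int × Int)) (acc : List (Int × Int)),
      acc.Pairwise (fun a b => (toLex a : Int ×ₗ Int) ≤ toLex b) →
      (xs.foldl (fun acc x => PySem.List.insertBy
        (fun a b => decide ((toLex a : Int ×ₗ Int) < toLex b)) x acc) acc).Pairwise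
        (fun a b => (toLex a : Int ×ₗ Int) ≤ toLex b) := by
    intro xs
    induction xs with
    | nil => intro acc h; exact h
    | cons x xs ih =>
      intro acc h
      exact ih _ (PySem.List.insertBy_pairwise_le (fun p => (toLex p : Int ×ₗ Int)) x acc h)
  refine (key ppl [] (by simp)).imp ?_
  intro a b hab
  rcases Prod.Lex.le_iff.mp hab with h | ⟨h, _⟩
  · exact le_of_lt h
  · exact le_of_eq h

theorem getD_eq_gE (s : List (Int × Int)) (i : Nat) (h : i < s.length) :
    s.getD i (0, 0) = s[i] := by
  simp [List.getD_eq_getElem?_getD, List.getElem?_eq_getElem h]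

theorem mapfst_getD (s : List (Int × Int)) (i : Nat) :
    (s.map Prod.fst).getD i 0 = (s.getD i (0, 0)).1 := by
  rcases h : s[i]? with _ | p <;> simp [List.getD, List.getElem?_map, h]

-- pointwise monotonicity of the money column, getD form
theorem sorted_mono (s : List (Int × Int))
    (hp : s.Pairwise (fun a b => a.1 ≤ b.1)) :
    ∀ i j, i ≤ j → j < s.length → (s.getD i (0, 0)).1 ≤ (s.getD j (0, 0)).1 := by
  intro i j hij hj
  rcases Nat.lt_or_ge i j with h | h
  · rw [getD_eq_gE s i (by omega), getD_eq_gE s j hj]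
    exact List.pairwise_iff_getElem.mp hp i j (by omega) hj h
  · have : i = j := by omega
    subst this
    exact le_refl _

-- sum of the friendship values of the first i (sorted) people: the meaning of B's prefix table
def sumTo (s : List (Int × Int)) (i : Nat) : Int := ((s.take i).map Prod.snd).sum

theorem sumTo_succ (s : List (Int × Int)) (l : Nat) (hl : l < s.length) :
    sumTo s (l + 1) = sumTo s l + (s.getD l (0, 0)).2 := by
  unfold sumTo
  rw [List.map_take, List.map_take,
    List.sum_take_succ (List.map Prod.snd s) l (by simpa using hl)]
  simp [List.getD_eq_getElem?_getD, List.getElem?_eq_getElem hl]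

theorem prefixOf_spec (s : List (Int × Int)) :
    (prefixOf s).length = s.length + 1 ∧
      ∀ i, i ≤ s.length → (prefixOf s).getD i 0 = sumTo s i := by
  induction s using List.reverseRecOn with
  | nil =>
    refine ⟨rfl, ?_⟩; intro i hi
    simp only [List.length_nil, Nat.le_zero] at hi
    subst hi; rfl
  | append_singleton t a ih =>
    obtain ⟨hlen, hget⟩ := ih
    have hne : prefixOf t ≠ [] := by
      intro h; rw [h] at hlen; simp at hlen
    have hstep : prefixOf (t ++ [a]) =
        prefixOf t ++ [PySem.List.pyGetD (prefixOf t) (-1) 0 + a.2] := by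
      unfold prefixOf
      rw [List.foldl_append]
      rfl
    have hidx : (prefixOf t).length - 1 = t.length := by omega
    have hlast : PySem.List.pyGetD (prefixOf t) (-1) 0 = sumTo t t.length := by
      rw [PySem.List.pyGetD_neg_one (prefixOf t) 0 hne]
      have h2 := hget t.length (le_refl _)
      rw [List.getD_eq_getElem?_getD, List.getElem?_eq_getElem (by omega)] at h2
      rw [List.getLast_eq_getElem]
      simp only [hidx]
      simpa using h2
    constructor
    · rw [hstep]; simp [hlen]
    · intro i hi
      rw [hstep]
      rcases Nat.lt_or_ge i (t.length + 1) with h | h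
      · rw [List.getD_eq_getElem?_getD, List.getElem?_append_left (by omega),
          ← List.getD_eq_getElem?_getD, hget i (by omega)]
        unfold sumTo
        rw [List.take_append_of_le_length (by omega)]
      · have hi' : i = t.length + 1 := by
          simp only [List.length_append, List.length_cons, List.length_nil] at hi; omega
        subst hi'
        rw [List.getD_eq_getElem?_getD, List.getElem?_append_right (by omega)]
        simp only [hlen]
        simp [hlast]
        unfold sumTo
        rw [List.take_of_length_le (by simp), List.take_of_length_le (by simp)]
        simp

-- 'm is the bisect_left point of t in xs': all entries before m are < t, entry m (if any) is ≥ t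
def isLB (xs : List Int) (t : Int) (m : Nat) : Prop :=
  m ≤ xs.length ∧ (∀ j, j < m → xs.getD j 0 < t) ∧ (m < xs.length → t ≤ xs.getD m 0)

theorem isLB_unique {xs : List Int} {t : Int} {m m' : Nat}
    (h : isLB xs t m) (h' : isLB xs t m') : m = m' := by
  obtain ⟨hm, hlt, hge⟩ := h
  obtain ⟨hm', hlt', hge'⟩ := h'
  by_contra hne
  rcases Nat.lt_or_ge m m' with hlt2 | hge2
  · have := hlt' m hlt2
    have := hge (by omega)
    omega
  · have hmm : m' < m := by omega
    have := hlt m' hmm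
    have := hge' (by omega)
    omega

theorem bLower_isLB (xs : List Int) (t : Int)
    (hmono : ∀ i j, i ≤ j → j < xs.length → xs.getD i 0 ≤ xs.getD j 0) :
    ∀ fuel lo hi, hi ≤ xs.length → lo ≤ hi → hi - lo ≤ fuel →
      (∀ j, j < lo → xs.getD j 0 < t) →
      (∀ j, hi ≤ j → j < xs.length → t ≤ xs.getD j 0) →
      isLB xs t (bLower xs t fuel lo hi) := by
  intro fuel
  induction fuel with
  | zero =>
    intro lo hi hhi hlo hf hbelow habove
    have : lo = hi := by omega
    subst this
    rw [bLower]
    exact ⟨by omega, hbelow, fun h => habove lo (le_refl _) h⟩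
  | succ fuel ih =>
    intro lo hi hhi hlo hf hbelow habove
    rw [bLower]
    by_cases h : lo < hi
    · rw [if_pos h]
      have hmid1 : lo ≤ (lo + hi) / 2 := by omega
      have hmid2 : (lo + hi) / 2 < hi := by omega
      by_cases hc : xs.getD ((lo + hi) / 2) 0 < t
      · rw [if_pos hc]
        refine ih ((lo + hi) / 2 + 1) hi hhi (by omega) (by omega) ?_ habove
        intro j hj
        rcases Nat.lt_or_ge j lo with h2 | h2
        · exact hbelow j h2
        · exact lt_of_le_of_lt (hmono j ((lo + hi) / 2) (by omega) (by omega)) hc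
      · rw [if_neg hc]
        refine ih lo ((lo + hi) / 2) (by omega) (by omega) (by omega) hbelow ?_
        intro j hj hjlen
        exact le_trans (not_lt.mp hc) (hmono ((lo + hi) / 2) j hj hjlen)
    · rw [if_neg h]
      have : lo = hi := by omega
      subst this
      exact ⟨by omega, hbelow, fun hh => habove lo (le_refl _) hh⟩

-- A's inner while loop stops exactly at the bisect_left point of ppl[l][0] + d,
-- having added the friendship values of the people it stepped over
theorem aInner_spec (s : List (Int × Int)) (d : Int) (hd : 0 < d)
    (hmono : ∀ i j, i ≤ j → j < s.length → (s.getD i (0, 0)).1 ≤ (s.getD j (0, 0)).1)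
    (l : Nat) (hl : l < s.length) :
    ∀ k r curr, s.length - r ≤ k → l ≤ r → r ≤ s.length →
      (∀ j, l ≤ j → j < r → (s.getD j (0, 0)).1 - (s.getD l (0, 0)).1 < d) →
      r ≤ (aInner s d l r curr).1 ∧
      isLB (s.map Prod.fst) ((s.getD l (0, 0)).1 + d) (aInner s d l r curr).1 ∧
      (aInner s d l r curr).2 = curr + (sumTo s (aInner s d l r curr).1 - sumTo s r) := by
  intro k
  induction k with
  | zero =>
    intro r curr hk hlr hr hwin
    have hrn : r = s.length := by omega
    rw [aInner, dif_neg (by omega)]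
    refine ⟨le_refl _, ⟨by simpa using hr, ?_, by simp [hrn]⟩, by ring⟩
    intro j hj
    rw [mapfst_getD]
    rcases Nat.lt_or_ge j l with h2 | h2
    · have := hmono j l (by omega) hl
      omega
    · have := hwin j h2 (by omega)
      omega
  | succ k ih =>
    intro r curr hk hlr hr hwin
    rw [aInner]
    by_cases hrn : r < s.length
    · rw [dif_pos hrn]
      have hxl : (s.getD l (0, 0)).1 ≤ s[r].1 := by
        have := hmono l r hlr hrn
        rwa [getD_eq_gE s r hrn] at this
      by_cases hc : |(s.getD l (0, 0)).1 - s[r].1| < d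
      · rw [if_pos hc]
        have habs : s[r].1 - (s.getD l (0, 0)).1 < d := by
          rw [abs_of_nonpos (by omega)] at hc; omega
        have hwin' : ∀ j, l ≤ j → j < r + 1 → (s.getD j (0, 0)).1 - (s.getD l (0, 0)).1 < d := by
          intro j hj hj2
          rcases Nat.lt_or_ge j r with h2 | h2
          · exact hwin j hj h2
          · have : j = r := by omega
            subst this
            rwa [getD_eq_gE s j hrn]
        obtain ⟨h1, h2, h3⟩ := ih (r + 1) (curr + s[r].2) (by omega) (by omega) (by omega) hwin'
        refine ⟨by omega, h2, ?_⟩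
        rw [h3, sumTo_succ s r hrn, getD_eq_gE s r hrn]
        ring
      · rw [if_neg hc]
        have habs : d ≤ s[r].1 - (s.getD l (0, 0)).1 := by
          rw [abs_of_nonpos (by omega)] at hc; omega
        refine ⟨le_refl _, ⟨by simpa using hr, ?_, ?_⟩, by ring⟩
        · intro j hj
          rw [mapfst_getD]
          rcases Nat.lt_or_ge j l with h2 | h2
          · have := hmono j l (by omega) hl
            omega
          · have := hwin j h2 (by omega)
            omega
        · intro _
          rw [mapfst_getD, getD_eq_gE s r hrn]
          omega
    · rw [dif_neg hrn]
      have hreq : r = s.length := by omega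
      refine ⟨le_refl _, ⟨by simpa using hr, ?_, by simp [hreq]⟩, by ring⟩
      intro j hj
      rw [mapfst_getD]
      rcases Nat.lt_or_ge j l with h2 | h2
      · have := hmono j l (by omega) hl
        omega
      · have := hwin j h2 (by omega)
        omega

-- A's outer loop and B's indexed loop with break agree, step by step
theorem aOuter_eq_bLoop (s : List (Int × Int)) (d : Int) (hd : 0 < d)
    (hmono : ∀ i j, i ≤ j → j < s.length → (s.getD i (0, 0)).1 ≤ (s.getD j (0, 0)).1) :
    ∀ fuelA fuelB l r curr best,
      l ≤ r → r ≤ s.length → s.length - l ≤ fuelA → s.length - l ≤ fuelB →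
      (∀ j, l ≤ j → j < r → (s.getD j (0, 0)).1 - (s.getD l (0, 0)).1 < d) →
      curr = sumTo s r - sumTo s l →
      aOuter s d fuelA l r curr best =
        (if r < s.length then
          bLoop (s.map Prod.fst) (prefixOf s) d s.length fuelB l best
        else best) := by
  have hmono' : ∀ i j, i ≤ j → j < (s.map Prod.fst).length →
      (s.map Prod.fst).getD i 0 ≤ (s.map Prod.fst).getD j 0 := by
    intro i j hij hj
    rw [mapfst_getD, mapfst_getD]
    exact hmono i j hij (by simpa using hj)
  obtain ⟨hplen, hpget⟩ := prefixOf_spec s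
  intro fuelA
  induction fuelA with
  | zero =>
    intro fuelB l r curr best hlr hr hfa hfb hwin hcurr
    have hrn : r = s.length := by omega
    rw [aOuter, if_neg (by omega)]
  | succ fuelA ih =>
    intro fuelB l r curr best hlr hr hfa hfb hwin hcurr
    rw [aOuter]
    by_cases hrn : r < s.length
    · rw [if_pos hrn]
      have hl : l < s.length := by omega
      obtain ⟨hr1, hlb, hval⟩ :=
        aInner_spec s d hd hmono l hl s.length r curr (by omega) hlr (by omega) hwin
      obtain ⟨hr'len, hr'lt, hr'ge⟩ := hlb
      have hr'len' : (aInner s d l r curr).1 ≤ s.length := by simpa using hr'len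
      -- the break condition: fuelB is positive here
      rcases fuelB with _ | fuelB
      · omega
      rw [bLoop, if_pos hl, mapfst_getD s l]
      -- B's bisect_left lands exactly where A's inner loop stopped
      have hbis : bLower (s.map Prod.fst) ((s.getD l (0, 0)).1 + d)
          (s.map Prod.fst).length 0 (s.map Prod.fst).length = (aInner s d l r curr).1 := by
        refine isLB_unique ?_ ⟨hr'len, hr'lt, hr'ge⟩
        exact bLower_isLB (s.map Prod.fst) _ hmono' (s.map Prod.fst).length 0
          (s.map Prod.fst).length (le_refl _) (by omega) (by omega)
          (by intro j hj; omega) (by intro j hj hj2; omega)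
      rw [hbis]
      dsimp only
      have hc' : (aInner s d l r curr).2 = sumTo s (aInner s d l r curr).1 - sumTo s l := by
        rw [hval, hcurr]; ring
      have hpre : (prefixOf s).getD (aInner s d l r curr).1 0 - (prefixOf s).getD l 0 =
          (aInner s d l r curr).2 := by
        rw [hpget _ hr'len', hpget _ (by omega), hc']
      rw [hpre]
      -- the recursive step
      have hlltr' : l < (aInner s d l r curr).1 := by
        by_contra hcon
        rw [not_lt] at hcon
        have h1 := hr'ge (by simpa using Nat.lt_of_le_of_lt hcon hl)
        rw [mapfst_getD] at h1
        have h2 := hmono (aInner s d l r curr).1 l hcon hl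
        omega
      have hrec := ih fuelB (l + 1) (aInner s d l r curr).1
        ((aInner s d l r curr).2 - (s.getD l (0, 0)).2) (max best (aInner s d l r curr).2)
        (by omega) hr'len' (by omega) (by omega) ?_ ?_
      · rw [hrec]
        by_cases hend : (aInner s d l r curr).1 = s.length
        · rw [if_pos hend, if_neg (by omega), if_pos hrn]
        · rw [if_neg hend, if_pos (by omega), if_pos hrn]
      · -- the window condition for the next left endpoint
        intro j hj hj2
        have hjlt := hr'lt j hj2
        rw [mapfst_getD] at hjlt
        have : (s.getD l (0, 0)).1 ≤ (s.getD (l + 1) (0, 0)).1 :=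
          hmono l (l + 1) (by omega) (by omega)
        omega
      · rw [hc', sumTo_succ s l hl]
        ring
    · rw [if_neg hrn, if_neg hrn]

theorem solution_spec : Claim_equal_solution := by
  intro ppl d _ hpre
  unfold Spec_solution solution solution_alt
  rcases hpre with h | hd
  · subst h
    rfl
  · have hmono := sorted_mono (PySem.List.sorted2 ppl Prod.fst Prod.snd)
      (sorted2_fst_pairwise ppl)
    have key := aOuter_eq_bLoop (PySem.List.sorted2 ppl Prod.fst Prod.snd) d hd hmono
      ((PySem.List.sorted2 ppl Prod.fst Prod.snd).length + 1)
      (PySem.List.sorted2 ppl Prod.fst Prod.snd).length 0 0 0 0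
      (by omega) (by omega) (by omega) (by omega)
      (by intro j hj hj2; omega)
      (by simp [sumTo])
    rw [key]
    by_cases hn : 0 < (PySem.List.sorted2 ppl Prod.fst Prod.snd).length
    · rw [if_pos hn]
    · rw [if_neg hn]
      have : (PySem.List.sorted2 ppl Prod.fst Prod.snd).length = 0 := by omega
      rw [this, bLoop]
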